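-- pv_equiv track=rewrite | github.com/OwenKephart/LinearProgramming | parser.py | get_patterns_matching
-- ===== SOURCE A (Python) =====
-- def get_patterns_matching(cats, pattern):
--
--     cat_names_pat = [x[0] for x in pattern]
--     mem_names_pat = [x[1] for x in pattern]
--
--     cat_names_rst = [x[0] for x in cats]
--     mem_names_rst = [x[1] for x in cats]
--
--     # remove categories that have already been accounted for in the pattern
--     for cat_name in cat_names_pat:
--         cat_idx = cat_names_rst.index(cat_name)
--         cat_names_rst.pop(cat_idx)
--         mem_names_rst.pop(cat_idx)
--
--     # at each step, add on all members to all matches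
--     matches = [pattern]
--     for (i, cat_name) in enumerate(cat_names_rst):
--         new_matches = []
--         for match in matches:
--             for mem in mem_names_rst[i]:
--                 new_matches.append(match + [(cat_name,mem)])
--         matches = new_matches
--
--     return matches
-- ===== SOURCE B (Python) =====
-- def get_patterns_matching(cats, pattern):
--     # count how many pattern entries consume each category name
--     need = {}
--     for (name, _mem) in pattern:
--         need[name] = need.get(name, 0) + 1
--     # one pass over cats: drop the first `need[name]` occurrences of each name
--     remaining = []
--     for (name, mems) in cats:
--         if need.get(name, 0) > 0:
--             need[name] = need.get(name, 0) - 1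
--         else:
--             remaining.append((name, mems))
--     # validate: every pattern entry must have consumed a category
--     for (name, _mem) in pattern:
--         if need.get(name, 0):
--             raise ValueError(f"unknown category {name!r} in pattern")
--     # recursively expand the remaining categories, last category varying fastest
--     def expand(rem):
--         if not rem:
--             return [[]]
--         name, mems = rem[0]
--         tails = expand(rem[1:])
--         return [[(name, m)] + t for m in mems for t in tails]
--     return [pattern + combo for combo in expand(remaining)]
-- ===== Notes on version B (the rewrite author's own statement) =====
-- stated objective: alternative
-- what changed: B replaces A's repeated .index/.pop removal with a single counting pass over cats, and replaces A's iterative accumulation of partial matches with a recursive expansion that builds each combination's suffix directly; Pre_ excludes inputs where some pattern category name occurs more often in the pattern than in cats, on which A raises ValueError.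
import Mathlib
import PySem

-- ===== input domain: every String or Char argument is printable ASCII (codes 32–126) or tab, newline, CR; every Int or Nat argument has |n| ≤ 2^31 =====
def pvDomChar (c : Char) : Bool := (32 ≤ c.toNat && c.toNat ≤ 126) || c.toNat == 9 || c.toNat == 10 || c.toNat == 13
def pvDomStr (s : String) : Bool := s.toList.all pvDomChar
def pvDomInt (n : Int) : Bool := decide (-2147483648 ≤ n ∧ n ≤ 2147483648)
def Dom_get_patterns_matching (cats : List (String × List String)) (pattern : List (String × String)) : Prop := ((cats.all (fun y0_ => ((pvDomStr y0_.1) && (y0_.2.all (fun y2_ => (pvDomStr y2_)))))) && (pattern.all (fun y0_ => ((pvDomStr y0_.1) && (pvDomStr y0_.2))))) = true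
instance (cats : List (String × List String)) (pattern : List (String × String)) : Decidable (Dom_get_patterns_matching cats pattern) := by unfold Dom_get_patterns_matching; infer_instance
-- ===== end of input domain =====

-- B counts pattern names once and filters cats in a single pass, then expands the
-- remaining categories by structural recursion instead of A's repeated index/pop
-- removal and iterative accumulation of partial mts (objective: alternative).

-- ===== PORT A =====
-- one iteration of A's removal loop: `.index` then parallel `.pop`; `none` from index?
-- is Python's ValueError (excluded by Pre_), the state is returned unchanged to stay total
def pvARemove (st : List String × List (List String)) (cat_name : String) :
    List String × List (List String) :=
  match PySem.List.index? st.1 cat_name with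
  | none => st
  | some i =>
      (match PySem.List.pop? st.1 (i : Int) with | none => st.1 | some r => r.2,
       match PySem.List.pop? st.2 (i : Int) with | none => st.2 | some r => r.2)

def get_patterns_matching (cats : List (String × List String)) (pattern : List (String × String)) : List (List (String × String)) :=
  let cat_names_pat := pattern.map (fun x => x.1)
  let _mem_names_pat := pattern.map (fun x => x.2)
  let st := cat_names_pat.foldl pvARemove (cats.map (fun x => x.1), cats.map (fun x => x.2))
  let cat_names_rst := st.1
  let mem_names_rst := st.2
  (PySem.List.enumerate cat_names_rst).foldl
    (fun mts p =>
      mts.foldl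
        (fun new_matches m =>
          ((PySem.List.pyGet? mem_names_rst p.1).getD []).foldl
            (fun nm mem => nm ++ [m ++ [(p.2, mem)]]) new_matches)
        [])
    [pattern]

-- ===== PORT B =====
-- expand(rem) of Source B: all combinations over the remaining categories, head slowest
def pvExpand : List (String × List String) → List (List (String × String))
  | [] => [[]]
  | (name, mems) :: rest =>
      let tails := pvExpand rest
      mems.flatMap (fun m => tails.map (fun t => (name, m) :: t))

def get_patterns_matching_alt (cats : List (String × List String)) (pattern : List (String × String)) : List (List (String × String)) :=
  let need := pattern.foldl (fun d p => d.modify p.1 0 (· + 1)) (PySem.Dict.empty : PySem.Dict String Int)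
  let st := cats.foldl
    (fun (st : PySem.Dict String Int × List (String × List String)) c =>
      if st.1.getD c.1 0 > 0 then (st.1.modify c.1 0 (· - 1), st.2)
      else (st.1, st.2 ++ [c]))
    (need, [])
  -- validation loop: any leftover count is Python's `raise ValueError` (outside Pre_);
  -- the port returns [] there to stay total
  if pattern.any (fun p => st.1.getD p.1 0 ≠ 0) then []
  else (pvExpand st.2).map (fun combo => pattern ++ combo)

-- ===== PRECONDITION & SPEC =====
-- Pre_ excludes exactly the inputs where A raises ValueError: some pattern category
-- name occurs more often in the pattern than among the cats names (list.index fails).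
def Pre_get_patterns_matching (cats : List (String × List String)) (pattern : List (String × String)) : Prop :=
  ∀ p ∈ pattern, (pattern.map (fun x => x.1)).count p.1 ≤ (cats.map (fun x => x.1)).count p.1
instance (cats : List (String × List String)) (pattern : List (String × String)) : Decidable (Pre_get_patterns_matching cats pattern) := by unfold Pre_get_patterns_matching; infer_instance
def pvWitness_get_patterns_matching : (List (String × List String)) × (List (String × String)) :=
  ([("size", ["s", "m"]), ("color", ["red"])], [("color", "red")])

def Spec_get_patterns_matching (cats : List (String × List String)) (pattern : List (String × String)) (out : List (List (String × String))) : Prop := out = get_patterns_matching_alt cats pattern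
instance (cats : List (String × List String)) (pattern : List (String × String)) (out : List (List (String × String))) : Decidable (Spec_get_patterns_matching cats pattern out) := by unfold Spec_get_patterns_matching; infer_instance

-- ===== CLAIM (what is proved, stated in full; the proofs are below) =====
def Claim_equal_get_patterns_matching : Prop := ∀ (cats : List (String × List String)) (pattern : List (String × String)), Dom_get_patterns_matching cats pattern → Pre_get_patterns_matching cats pattern → Spec_get_patterns_matching cats pattern (get_patterns_matching cats pattern)

-- ===== LEMMAS AND PROOFS =====

-- remove the first pair whose name is n
def pvRemoveFirst (n : String) : List (String × List String) → List (String × List String)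
  | [] => []
  | c :: rest => if c.1 = n then rest else c :: pvRemoveFirst n rest

-- A's whole removal phase, on the pair list
def pvRemA (pats : List String) (P : List (String × List String)) : List (String × List String) :=
  pats.foldl (fun Q n => pvRemoveFirst n Q) P

-- B's counting filter, abstracted over the count function
def pvRemF (f : String → Int) : List (String × List String) → List (String × List String)
  | [] => []
  | c :: rest => if f c.1 > 0 then pvRemF (fun x => if x = c.1 then f x - 1 else f x) rest
      else c :: pvRemF f rest

-- A's product phase, on the pair list
def pvFoldPairs : List (String × List String) → List (List (String × String)) → List (List (String × String))
  | [], ms => ms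
  | c :: rest, ms => pvFoldPairs rest (ms.flatMap (fun m => c.2.map (fun mem => m ++ [(c.1, mem)])))

theorem pvRemoveFirst_eq_eraseIdx (n : String) (P : List (String × List String)) (k : Nat)
    (h : PySem.List.index? (P.map (fun x => x.1)) n = some k) :
    pvRemoveFirst n P = P.eraseIdx k := by
  induction P generalizing k with
  | nil => simp [PySem.List.index?] at h
  | cons c rest ih =>
    by_cases hc : c.1 = n
    · rw [List.map_cons, hc, PySem.List.index?_cons_self] at h
      obtain rfl : (0 : Nat) = k := by simpa using h
      simp [pvRemoveFirst, hc]
    · rw [List.map_cons, PySem.List.index?_cons_of_ne _ hc] at h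
      cases hk : PySem.List.index? (rest.map (fun x => x.1)) n with
      | none => rw [hk] at h; simp at h
      | some k' =>
        rw [hk] at h
        obtain rfl : k' + 1 = k := by simpa using h
        simp [pvRemoveFirst, hc, List.eraseIdx_cons_succ, ih k' hk]

theorem pvARemove_eq (P : List (String × List String)) (n : String)
    (h : n ∈ P.map (fun x => x.1)) :
    pvARemove (P.map (fun x => x.1), P.map (fun x => x.2)) n
      = ((pvRemoveFirst n P).map (fun x => x.1), (pvRemoveFirst n P).map (fun x => x.2)) := by
  obtain ⟨k, hk⟩ : ∃ k, PySem.List.index? (P.map (fun x => x.1)) n = some k := by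
    have := (PySem.List.index?_isSome_iff (xs := P.map (fun x => x.1)) (v := n)).mpr h
    exact Option.isSome_iff_exists.mp this
  obtain ⟨hklt, -, -⟩ := PySem.List.getElem_of_index?_eq_some hk
  have hklt1 : k < (P.map (fun x => x.1)).length := hklt
  have hklt2 : k < (P.map (fun x => x.2)).length := by simpa using (by simpa using hklt1 : k < P.length)
  unfold pvARemove
  simp only [hk]
  simp only [PySem.List.pop?_natCast _ _ hklt1, PySem.List.pop?_natCast _ _ hklt2]
  simp [pvRemoveFirst_eq_eraseIdx n P k hk, List.eraseIdx_map]

theorem pvCount_removeFirst (n : String) (P : List (String × List String)) (x : String)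
    (h : n ∈ P.map (fun y => y.1)) :
    ((pvRemoveFirst n P).map (fun y => y.1)).count x + (if x = n then 1 else 0)
      = (P.map (fun y => y.1)).count x := by
  induction P with
  | nil => simp at h
  | cons c rest ih =>
    by_cases hc : c.1 = n
    · simp only [pvRemoveFirst, hc, List.map_cons, List.count_cons, beq_iff_eq]
      by_cases hx : x = n
      · simp [hx]
      · simp [hx, Ne.symm hx]
    · have hn' : n ∈ rest.map (fun y => y.1) := by
        rcases List.mem_cons.mp h with h1 | h1
        · exact absurd h1.symm hc
        · exact h1
      simp only [pvRemoveFirst, if_neg hc, List.map_cons, List.count_cons, beq_iff_eq]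
      have hih := ih hn'
      by_cases hx : x = n
      · simp only [if_pos hx] at hih ⊢
        split_ifs with h1 <;> omega
      · simp only [if_neg hx] at hih ⊢
        split_ifs with h1 <;> omega

theorem pvFoldA_eq_remA (pats : List String) (P : List (String × List String))
    (h : ∀ x, pats.count x ≤ (P.map (fun y => y.1)).count x) :
    pats.foldl pvARemove (P.map (fun y => y.1), P.map (fun y => y.2))
      = ((pvRemA pats P).map (fun y => y.1), (pvRemA pats P).map (fun y => y.2)) := by
  induction pats generalizing P with
  | nil => simp [pvRemA]
  | cons n ns ih =>
    have hmem : n ∈ P.map (fun y => y.1) := by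
      have h1 := h n
      have h2 : 0 < (P.map (fun y => y.1)).count n := by
        have : 0 < (n :: ns).count n := by simp
        omega
      exact List.count_pos_iff.mp h2
    have hstep : pvRemA (n :: ns) P = pvRemA ns (pvRemoveFirst n P) := by
      simp [pvRemA]
    rw [List.foldl_cons, pvARemove_eq P n hmem, hstep]
    apply ih
    intro x
    have h1 := h x
    have h2 := pvCount_removeFirst n P x hmem
    have h3 : (n :: ns).count x = ns.count x + (if x = n then 1 else 0) := by
      rw [List.count_cons]
      by_cases hx : x = n
      · simp [hx]
      · simp [hx, Ne.symm hx]
    by_cases hx : x = n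
    · simp only [if_pos hx] at h2 h3; omega
    · simp only [if_neg hx] at h2 h3; omega

theorem pvRemF_nonpos (f : String → Int) (P : List (String × List String))
    (h : ∀ x, f x ≤ 0) : pvRemF f P = P := by
  induction P with
  | nil => rfl
  | cons c rest ih =>
    have := h c.1
    simp only [pvRemF, if_neg (by omega : ¬ f c.1 > 0)]
    rw [ih]

theorem pvRemF_bump (P : List (String × List String)) (f : String → Int)
    (hf : ∀ x, 0 ≤ f x) (n : String) (hn : n ∈ P.map (fun y => y.1)) :
    pvRemF (fun x => if x = n then f x + 1 else f x) P = pvRemF f (pvRemoveFirst n P) := by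
  induction P generalizing f with
  | nil => simp at hn
  | cons c rest ih =>
    by_cases hc : c.1 = n
    · have hpos : (if c.1 = n then f c.1 + 1 else f c.1) > 0 := by
        have := hf c.1; simp only [if_pos hc]; omega
      have hfe : (fun x => if x = c.1 then (if x = n then f x + 1 else f x) - 1
          else (if x = n then f x + 1 else f x)) = f := by
        funext x
        by_cases hx : x = c.1
        · simp [hx, hc]
        · have hxn : ¬ x = n := fun hh => hx (hh.trans hc.symm)
          simp [hx, hxn]
      simp only [pvRemF, pvRemoveFirst, if_pos hc, hfe]
      rw [if_pos (by have := hf c.1; omega : f c.1 + 1 > 0)]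
    · have hn' : n ∈ rest.map (fun y => y.1) := by
        rcases List.mem_cons.mp hn with h1 | h1
        · exact absurd h1.symm hc
        · exact h1
      have hcn : (if c.1 = n then f c.1 + 1 else f c.1) = f c.1 := by simp [hc]
      by_cases hp : f c.1 > 0
      · have hcomm : (fun x => if x = c.1 then (if x = n then f x + 1 else f x) - 1
            else (if x = n then f x + 1 else f x))
            = (fun x => if x = n then (if x = c.1 then f x - 1 else f x) + 1
            else (if x = c.1 then f x - 1 else f x)) := by
          funext x
          by_cases hx1 : x = c.1
          · have hxn : ¬ x = n := fun hh => hc (hx1.symm.trans hh)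
            simp [hx1, hc]
          · by_cases hx2 : x = n <;> simp [hx1, hx2, Ne.symm hc]
        have hf' : ∀ x, 0 ≤ (if x = c.1 then f x - 1 else f x) := by
          intro x
          by_cases hx : x = c.1
          · simp only [hx]; omega
          · simp only [if_neg hx]; exact hf x
        simp only [pvRemF, hcn, if_pos hp, pvRemoveFirst, if_neg hc, hcomm]
        exact ih _ hf' hn'
      · simp only [pvRemF, hcn, if_neg hp, pvRemoveFirst, if_neg hc]
        rw [ih f hf hn']

theorem pvRemA_eq_remF (pats : List String) (P : List (String × List String))
    (h : ∀ x, pats.count x ≤ (P.map (fun y => y.1)).count x) :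
    pvRemA pats P = pvRemF (fun x => (pats.count x : Int)) P := by
  induction pats generalizing P with
  | nil =>
    simp only [pvRemA, List.foldl_nil]
    exact (pvRemF_nonpos _ P (by simp)).symm
  | cons n ns ih =>
    have hmem : n ∈ P.map (fun y => y.1) := by
      have h1 := h n
      have h2 : 0 < (P.map (fun y => y.1)).count n := by
        have : 0 < (n :: ns).count n := by simp
        omega
      exact List.count_pos_iff.mp h2
    have hstep : pvRemA (n :: ns) P = pvRemA ns (pvRemoveFirst n P) := by
      simp [pvRemA]
    have hcounts : ∀ x, ns.count x ≤ ((pvRemoveFirst n P).map (fun y => y.1)).count x := by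
      intro x
      have h1 := h x
      have h2 := pvCount_removeFirst n P x hmem
      have h3 : (n :: ns).count x = ns.count x + (if x = n then 1 else 0) := by
        rw [List.count_cons]
        by_cases hx : x = n
        · simp [hx]
        · simp [hx, Ne.symm hx]
      by_cases hx : x = n
      · simp only [if_pos hx] at h2 h3; omega
      · simp only [if_neg hx] at h2 h3; omega
    have hbump : (fun x => ((n :: ns).count x : Int))
        = (fun x => if x = n then (ns.count x : Int) + 1 else (ns.count x : Int)) := by
      funext x
      rw [List.count_cons]
      by_cases hx : x = n
      · simp [hx]
      · simp [hx, Ne.symm hx]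
    rw [hstep, ih _ hcounts, hbump,
      pvRemF_bump P (fun x => (ns.count x : Int)) (by intro x; positivity) n hmem]

theorem pvBFilter (cats : List (String × List String)) (d : PySem.Dict String Int)
    (acc : List (String × List String)) :
    (cats.foldl
      (fun (st : PySem.Dict String Int × List (String × List String)) c =>
        if st.1.getD c.1 0 > 0 then (st.1.modify c.1 0 (· - 1), st.2)
        else (st.1, st.2 ++ [c]))
      (d, acc)).2
      = acc ++ pvRemF (fun x => d.getD x 0) cats := by
  induction cats generalizing d acc with
  | nil => simp [pvRemF]
  | cons c rest ih =>
    simp only [List.foldl_cons]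
    by_cases hp : d.getD c.1 0 > 0
    · rw [if_pos hp]
      rw [ih]
      have hfe : (fun x => (d.modify c.1 0 (· - 1)).getD x 0)
          = (fun x => if x = c.1 then d.getD x 0 - 1 else d.getD x 0) := by
        funext x
        rw [PySem.Dict.getD_modify]
        by_cases hx : x = c.1 <;> simp [hx]
      simp only [pvRemF, if_pos hp, hfe]
    · rw [if_neg hp]
      rw [ih]
      simp [pvRemF, if_neg hp]

theorem pvEnumFold (mems0 : List (List String)) (P : List (String × List String)) :
    ∀ (k : Nat) (acc : List (List (String × String))),
    mems0.drop k = P.map (fun x => x.2) →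
    (PySem.List.enumerate (P.map (fun x => x.1)) (k : Int)).foldl
      (fun mts p =>
        mts.foldl
          (fun nm m =>
            ((PySem.List.pyGet? mems0 p.1).getD []).foldl
              (fun nm2 mem => nm2 ++ [m ++ [(p.2, mem)]]) nm)
          [])
      acc
    = pvFoldPairs P acc := by
  induction P generalizing mems0 with
  | nil => intro k acc h; simp [pvFoldPairs]
  | cons c rest ih =>
    intro k acc h
    rw [List.map_cons, PySem.List.enumerate_cons, List.foldl_cons]
    have hget : PySem.List.pyGet? mems0 ((k : Nat) : Int) = some c.2 := by
      rw [PySem.List.pyGet?_natCast]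
      have h0 : (mems0.drop k)[0]? = mems0[k]? := by simp [List.getElem?_drop]
      rw [← h0, h]
      rfl
    have hstep : (acc.foldl (fun nm m =>
          ((PySem.List.pyGet? mems0 ((k : Nat) : Int)).getD []).foldl
            (fun nm2 mem => nm2 ++ [m ++ [(c.1, mem)]]) nm) [])
        = acc.flatMap (fun m => c.2.map (fun mem => m ++ [(c.1, mem)])) := by
      rw [hget]
      simp only [Option.getD_some]
      have h1 : ∀ nm m, c.2.foldl (fun nm2 mem => nm2 ++ [m ++ [(c.1, mem)]]) nm
          = nm ++ c.2.map (fun mem => m ++ [(c.1, mem)]) := by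
        intro nm m
        exact PySem.List.foldl_append_singleton_eq_map _ _ _
      simp only [h1]
      simpa using PySem.List.foldl_append_eq_flatMap
        (fun m => c.2.map (fun mem => m ++ [(c.1, mem)])) acc []
    rw [hstep]
    have hcast : (k : Int) + 1 = ((k + 1 : Nat) : Int) := by push_cast; ring
    have hdrop : mems0.drop (k + 1) = rest.map (fun x => x.2) := by
      have := congrArg List.tail h
      simpa [List.tail_drop] using this
    rw [hcast, ih mems0 (k + 1) _ hdrop]
    simp [pvFoldPairs]

theorem pvFoldPairs_eq_expand (P : List (String × List String)) :
    ∀ (ms : List (List (String × String))),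
    pvFoldPairs P ms = ms.flatMap (fun m => (pvExpand P).map (fun t => m ++ t)) := by
  induction P with
  | nil => intro ms; simp [pvFoldPairs, pvExpand]
  | cons c rest ih =>
    intro ms
    obtain ⟨n, l⟩ := c
    simp only [pvFoldPairs, pvExpand]
    rw [ih]
    simp only [List.flatMap_map, List.map_flatMap, List.map_map,
      List.flatMap_assoc, List.append_assoc]
    rfl

-- ===== VERDICT (by name: the statement is the Claim_ definition above) =====
theorem pvBFilterNeed (cats : List (String × List String)) (d : PySem.Dict String Int)
    (acc : List (String × List String)) (x : String) (hd : 0 ≤ d.getD x 0) :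
    ((cats.foldl
      (fun (st : PySem.Dict String Int × List (String × List String)) c =>
        if st.1.getD c.1 0 > 0 then (st.1.modify c.1 0 (· - 1), st.2)
        else (st.1, st.2 ++ [c]))
      (d, acc)).1).getD x 0
      = d.getD x 0 - min (d.getD x 0) (((cats.map (fun y => y.1)).count x : Nat) : Int) := by
  induction cats generalizing d acc with
  | nil => simp; omega
  | cons c rest ih =>
    simp only [List.foldl_cons]
    have hcnt : (0 : Int) ≤ ((rest.map (fun y => y.1)).count x : Nat) := by positivity
    by_cases hp : d.getD c.1 0 > 0
    · rw [if_pos hp]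
      rw [ih _ _ (by rw [PySem.Dict.getD_modify]; split_ifs with h1 <;> omega)]
      rw [PySem.Dict.getD_modify]
      rw [List.map_cons, List.count_cons]
      by_cases hx : x = c.1
      · rw [if_pos hx, if_pos (by simp [hx])]
        rw [hx]
        rw [hx] at hd
        push_cast
        omega
      · rw [if_neg hx, if_neg (by simp; exact fun hh => hx hh.symm)]
        simp
    · rw [if_neg hp, ih _ _ hd]
      rw [List.map_cons, List.count_cons]
      by_cases hx : x = c.1
      · have hx0 : d.getD x 0 ≤ 0 := by rw [hx]; omega
        rw [if_pos (by simp [hx])]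
        push_cast
        omega
      · rw [if_neg (by simp; exact fun hh => hx hh.symm)]
        simp

theorem pvNeedCount (pattern : List (String × String)) :
    (fun x => (pattern.foldl (fun d p => d.modify p.1 0 (· + 1))
        (PySem.Dict.empty : PySem.Dict String Int)).getD x 0)
      = (fun x => (((pattern.map (fun y => y.1)).count x : Nat) : Int)) := by
  funext x
  have h1 : pattern.foldl (fun d p => d.modify p.1 0 (· + 1))
      (PySem.Dict.empty : PySem.Dict String Int)
      = (pattern.map (fun y => y.1)).foldl (fun d s => d.modify s 0 (· + 1))
        (PySem.Dict.empty : PySem.Dict String Int) := by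
    rw [List.foldl_map]
  rw [h1, PySem.Dict.getD_foldl_modify_add_one]
  simp

theorem get_patterns_matching_spec : Claim_equal_get_patterns_matching := by
  intro cats pattern _hd hpre
  unfold Spec_get_patterns_matching get_patterns_matching get_patterns_matching_alt
  have hcount : ∀ x, (pattern.map (fun y => y.1)).count x ≤ (cats.map (fun y => y.1)).count x := by
    intro x
    by_cases hx : x ∈ pattern.map (fun y => y.1)
    · obtain ⟨p, hp, rfl⟩ := List.mem_map.mp hx
      exact hpre p hp
    · simp [List.count_eq_zero.mpr hx]
  simp only []
  rw [pvFoldA_eq_remA (pattern.map (fun x => x.1)) cats hcount]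
  have hQ : pvRemA (pattern.map (fun x => x.1)) cats
      = pvRemF (fun x => (((pattern.map (fun y => y.1)).count x : Nat) : Int)) cats :=
    pvRemA_eq_remF _ cats hcount
  have henum := pvEnumFold ((pvRemA (pattern.map (fun x => x.1)) cats).map (fun x => x.2))
    (pvRemA (pattern.map (fun x => x.1)) cats) 0 [pattern] (by simp)
  rw [show ((0 : Nat) : Int) = 0 from rfl] at henum
  have hval : (pattern.any (fun p =>
      ((cats.foldl
        (fun (st : PySem.Dict String Int × List (String × List String)) c =>
          if st.1.getD c.1 0 > 0 then (st.1.modify c.1 0 (· - 1), st.2)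
          else (st.1, st.2 ++ [c]))
        (pattern.foldl (fun d p => d.modify p.1 0 (· + 1))
          (PySem.Dict.empty : PySem.Dict String Int), [])).1).getD p.1 0 ≠ 0)) = false := by
    rw [List.any_eq_false]
    intro p hp
    rw [pvBFilterNeed _ _ _ _ (by rw [congrFun (pvNeedCount pattern) p.1]; positivity)]
    have h1 := congrFun (pvNeedCount pattern) p.1
    simp only [] at h1
    rw [h1]
    have h2 := hpre p hp
    simp only [ne_eq, Decidable.not_not, decide_eq_true_eq]
    omega
  rw [henum, pvFoldPairs_eq_expand, hval]
  rw [pvBFilter, pvNeedCount, ← hQ]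
  simp
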